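-- pv_equiv track=rewrite | github.com/stone1098/algorithm | Implementation/boj_5430.py | func
-- ===== SOURCE A (Python) =====
-- from collections import deque
--
-- def func(word, n, arr):
--     if n == 0:
--         arr = deque()
--     else:
--         arr = deque(list(map(int, arr[1:-1].split(','))))
--
--     flag = 1
--
--     for w in word:
--         if w == 'R':
--             if flag:
--                 flag = 0
--             else:
--                 flag = 1
--         else:
--             if len(arr) == 0:
--                 return 'error'
--             arr.popleft() if flag else arr.pop()
--
--     if flag == 1:
--         return str(list(arr)).replace(' ', '')
--     else:
--         arr.reverse()
--         return str(list(arr)).replace(' ', '')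
-- ===== SOURCE B (Python) =====
-- def func(word, n, arr):
--     data = [] if n == 0 else [int(x) for x in arr[1:-1].split(',')]
--     segs = word.split('R')
--     front = back = 0
--     for i, s in enumerate(segs):
--         if i % 2 == 0:
--             front += len(s)
--         else:
--             back += len(s)
--     if front + back > len(data):
--         return 'error'
--     rem = data[front:len(data) - back]
--     if len(segs) % 2 == 0:
--         rem.reverse()
--     return '[' + ','.join(map(str, rem)) + ']'
-- ===== Notes on version B (the rewrite author's own statement) =====
-- stated objective: alternative
-- what changed: B never simulates the per-character flag/deque at all: it splits word on 'R' and sums segment lengths at even/odd segment index to get the front/back deletion counts, detects error by total deletions exceeding len(data), and takes one final slice (reversed when the segment count is even).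
import Mathlib
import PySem

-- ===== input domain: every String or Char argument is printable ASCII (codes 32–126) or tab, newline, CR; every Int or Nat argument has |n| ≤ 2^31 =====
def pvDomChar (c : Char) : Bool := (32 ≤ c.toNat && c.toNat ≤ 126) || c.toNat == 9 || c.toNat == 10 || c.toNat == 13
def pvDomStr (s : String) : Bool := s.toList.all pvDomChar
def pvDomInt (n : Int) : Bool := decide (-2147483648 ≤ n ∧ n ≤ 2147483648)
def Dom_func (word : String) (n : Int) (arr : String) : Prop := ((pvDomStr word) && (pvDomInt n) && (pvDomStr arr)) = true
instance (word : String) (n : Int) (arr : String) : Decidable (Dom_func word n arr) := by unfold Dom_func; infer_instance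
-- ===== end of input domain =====

-- B replaces A's per-character flag/deque simulation by splitting the word on 'R':
-- deletions in even-indexed segments come off the front, odd-indexed off the back,
-- one final slice (objective: alternative; same asymptotic cost).

-- ===== PORT A =====

-- parse of `deque(list(map(int, arr[1:-1].split(','))))`; int(x) raising = none, excluded by Pre_
def parseA (n : Int) (arr : String) : List Int :=
  if n == 0 then []
  else (((PySem.Str.split? (PySem.Str.slice arr (some 1) (some (-1))) ",").getD []).map
    (fun s => (PySem.Int.ofStr? s).getD 0))

-- str(list(xs)).replace(' ', '') — exact for a list of ints (no spaces inside str(int))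
def fmtA (l : List Int) : String :=
  "[" ++ PySem.Str.join "," (l.map PySem.Int.toStr) ++ "]"

-- the for-loop of A: none = the early `return 'error'`
def popSim : List Char → Bool → List Int → Option (Bool × List Int)
  | [], flag, arr => some (flag, arr)
  | w :: rest, flag, arr =>
    if w = 'R' then
      popSim rest (if flag then false else true) arr
    else
      if arr.length = 0 then none
      else popSim rest flag (if flag then arr.tail else arr.dropLast)

def func (word : String) (n : Int) (arr : String) : String :=
  let ar := parseA n arr
  match popSim word.toList true ar with
  | none => "error"
  | some (flag, ar) => if flag then fmtA ar else fmtA ar.reverse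

-- ===== PORT B =====

-- `for i, s in enumerate(segs): front/back += len(s)` depending on i % 2
def segSums : List String → Int → Int → Int → Int × Int
  | [], _, front, back => (front, back)
  | s :: rest, i, front, back =>
    if PySem.Int.mod i 2 = 0 then segSums rest (i + 1) (front + PySem.Str.len s) back
    else segSums rest (i + 1) front (back + PySem.Str.len s)

def func_alt (word : String) (n : Int) (arr : String) : String :=
  -- data = [] if n == 0 else [int(x) for x in arr[1:-1].split(',')]
  let data : List Int :=
    if n == 0 then []
    else (((PySem.Str.split? (PySem.Str.slice arr (some 1) (some (-1))) ",").getD []).map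
      (fun x => (PySem.Int.ofStr? x).getD 0))
  -- segs = word.split('R')
  let segs := (PySem.Str.split? word "R").getD []
  let fb := segSums segs 0 0 0
  if (data.length : Int) < fb.1 + fb.2 then "error"
  else
    -- rem = data[front:len(data)-back]; rem.reverse() when len(segs) even
    let rem := PySem.List.slice data (some fb.1) (some ((data.length : Int) - fb.2))
    let rem := if segs.length % 2 = 0 then rem.reverse else rem
    "[" ++ PySem.Str.join "," (rem.map PySem.Int.toStr) ++ "]"

-- ===== PRECONDITION & SPEC =====
-- Pre_ excludes exactly the inputs where int() raises ValueError in A (and in B):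
-- n ≠ 0 with some comma-separated piece of arr[1:-1] not an int literal.
def Pre_func (word : String) (n : Int) (arr : String) : Prop :=
  n = 0 ∨ ∀ s ∈ (PySem.Str.split? (PySem.Str.slice arr (some 1) (some (-1))) ",").getD [],
    PySem.Int.ofStr? s ≠ none
instance (word : String) (n : Int) (arr : String) : Decidable (Pre_func word n arr) := by
  unfold Pre_func; infer_instance

def pvWitness_func : String × Int × String := ("RDRD", 3, "[1,2,3]")

def Spec_func (word : String) (n : Int) (arr : String) (out : String) : Prop := out = func_alt word n arr
instance (word : String) (n : Int) (arr : String) (out : String) : Decidable (Spec_func word n arr out) := by unfold Spec_func; infer_instance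

-- ===== CLAIM (what is proved, stated in full; the proofs are below) =====
def Claim_equal_func : Prop := ∀ (word : String) (n : Int) (arr : String), Dom_func word n arr → Pre_func word n arr → Spec_func word n arr (func word n arr)

-- ===== LEMMAS AND PROOFS =====

-- proof-side model of word.split('R')
def splitR : List Char → List (List Char)
  | [] => [[]]
  | c :: rest =>
    if c = 'R' then [] :: splitR rest
    else (c :: (splitR rest).headI) :: (splitR rest).tail

lemma splitR_ne_nil (l : List Char) : splitR l ≠ [] := by
  cases l with
  | nil => simp [splitR]
  | cons c rest => by_cases h : c = 'R' <;> simp [splitR, h]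

lemma splitR_headI_tail (l : List Char) : (splitR l).headI :: (splitR l).tail = splitR l := by
  rcases hl : splitR l with _ | ⟨h, t⟩
  · exact absurd hl (splitR_ne_nil l)
  · rfl

lemma go_cons (fuel : Nat) (c : Char) (rest cur : List Char) (acc : List (List Char)) :
    PySem.Chars.splitOn.go ['R'] (fuel + 1) (c :: rest) cur acc =
      if c = 'R' then PySem.Chars.splitOn.go ['R'] fuel rest [] (cur.reverse :: acc)
      else PySem.Chars.splitOn.go ['R'] fuel rest (c :: cur) acc := by
  rw [PySem.Chars.splitOn.go.eq_def]
  simp [List.isPrefixOf]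
  by_cases h : c = 'R' <;> simp [h, eq_comm]

lemma go_spec (fuel : Nat) : ∀ (l cur : List Char) (acc : List (List Char)), l.length < fuel →
    PySem.Chars.splitOn.go ['R'] fuel l cur acc =
      acc.reverse ++ ((cur.reverse ++ (splitR l).headI) :: (splitR l).tail) := by
  induction fuel with
  | zero => intro l cur acc h; omega
  | succ fuel ih =>
    intro l cur acc h
    cases l with
    | nil =>
      rw [PySem.Chars.splitOn.go.eq_def]
      simp [splitR]
    | cons c rest =>
      rw [go_cons]
      by_cases hc : c = 'R'
      · rw [if_pos hc, ih rest [] (cur.reverse :: acc) (by simpa using Nat.lt_of_succ_lt_succ h)]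
        simp [splitR, hc, splitR_headI_tail]
      · rw [if_neg hc, ih rest (c :: cur) acc (by simpa using Nat.lt_of_succ_lt_succ h)]
        simp [splitR, hc]

lemma splitOn_eq_splitR (l : List Char) : PySem.Chars.splitOn l ['R'] = splitR l := by
  show PySem.Chars.splitOn.go ['R'] (l.length + 1) l [] [] = splitR l
  rw [go_spec (l.length + 1) l [] [] (by omega)]
  rcases hl : splitR l with _ | ⟨h, t⟩
  · exact absurd hl (splitR_ne_nil l)
  · simp

-- (even-index, odd-index) length sums of a segment list
def evod : List (List Char) → Nat × Nat
  | [] => (0, 0)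
  | s :: r => ((evod r).2 + s.length, (evod r).1)

-- the same two numbers read directly off the characters
def evodC : List Char → Nat × Nat
  | [] => (0, 0)
  | c :: w => if c = 'R' then ((evodC w).2, (evodC w).1) else ((evodC w).1 + 1, (evodC w).2)

-- parity of the number of 'R's
def rpar : List Char → Bool
  | [] => false
  | c :: w => if c = 'R' then !rpar w else rpar w

lemma evod_splitR (w : List Char) : evod (splitR w) = evodC w := by
  induction w with
  | nil => simp [splitR, evod, evodC]
  | cons c rest ih =>
    by_cases hc : c = 'R'
    · simp [splitR, evodC, hc, evod, ← ih]
    · rcases hl : splitR rest with _ | ⟨h, t⟩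
      · exact absurd hl (splitR_ne_nil rest)
      · simp [splitR, evodC, hc, evod, ← ih, hl]
        omega

lemma length_splitR (w : List Char) : (splitR w).length % 2 = if rpar w then 0 else 1 := by
  induction w with
  | nil => simp [splitR, rpar]
  | cons c rest ih =>
    by_cases hc : c = 'R'
    · simp only [splitR, rpar, hc, if_pos]
      rw [List.length_cons]
      rcases hr : rpar rest <;> simp [hr] at ih ⊢ <;> omega
    · have hs : splitR (c :: rest) = (c :: (splitR rest).headI) :: (splitR rest).tail := by
        simp [splitR, hc]
      have hr : rpar (c :: rest) = rpar rest := by simp [rpar, hc]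
      rcases hl : splitR rest with _ | ⟨h, t⟩
      · exact absurd hl (splitR_ne_nil rest)
      · rw [hl] at ih hs
        rw [hs, hr]
        simp only [List.length_cons, List.tail_cons] at ih ⊢
        exact ih

lemma segSums_spec (L : List String) : ∀ (i f b : Int), 0 ≤ i →
    segSums L i f b =
      if i % 2 = 0 then (f + ((evod (L.map String.toList)).1 : Int), b + ((evod (L.map String.toList)).2 : Int))
      else (f + ((evod (L.map String.toList)).2 : Int), b + ((evod (L.map String.toList)).1 : Int)) := by
  induction L with
  | nil =>
    intro i f b _
    simp [segSums, evod]
  | cons s rest ih =>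
    intro i f b hi
    have hm : PySem.Int.mod i 2 = i % 2 := by
      show i.fmod 2 = i % 2
      rw [Int.fmod_eq_emod]
      simp
    have hlen : PySem.Str.len s = (s.toList.length : Int) := PySem.Str.len_eq s
    have h2 : (i + 1) % 2 = if i % 2 = 0 then 1 else 0 := by omega
    by_cases hp : i % 2 = 0
    · rw [show segSums (s :: rest) i f b = if PySem.Int.mod i 2 = 0 then segSums rest (i + 1) (f + PySem.Str.len s) b else segSums rest (i + 1) f (b + PySem.Str.len s) from rfl]
      rw [hm, if_pos hp, ih (i + 1) _ _ (by omega), if_neg (by omega)]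
      simp only [List.map_cons, evod, hlen, if_pos hp, Prod.mk.injEq]
      constructor <;> push_cast <;> ring
    · rw [show segSums (s :: rest) i f b = if PySem.Int.mod i 2 = 0 then segSums rest (i + 1) (f + PySem.Str.len s) b else segSums rest (i + 1) f (b + PySem.Str.len s) from rfl]
      rw [hm, if_neg hp, ih (i + 1) _ _ (by omega), if_pos (by omega)]
      simp only [List.map_cons, evod, hlen, if_neg hp, Prod.mk.injEq]
      constructor <;> push_cast <;> ring

-- the heart: A's loop computes exactly the evodC counters and the 'R' parity
lemma popSim_spec (chars : List Char) : ∀ (flag : Bool) (arr : List Int),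
    popSim chars flag arr =
      (let f := if flag then (evodC chars).1 else (evodC chars).2
       let b := if flag then (evodC chars).2 else (evodC chars).1
       if arr.length < f + b then none
       else some (xor flag (rpar chars), (arr.drop f).take (arr.length - f - b))) := by
  induction chars with
  | nil =>
    intro flag arr
    simp [popSim, evodC, rpar]
  | cons c rest ih =>
    intro flag arr
    by_cases hc : c = 'R'
    · have hfl : (if flag then false else true) = !flag := by cases flag <;> rfl
      rw [show popSim (c :: rest) flag arr = popSim rest (if flag then false else true) arr by simp [popSim, hc]]
      rw [hfl, ih (!flag) arr]
      cases flag <;> simp [evodC, rpar, hc]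
    · rw [show popSim (c :: rest) flag arr =
          (if arr.length = 0 then none else popSim rest flag (if flag then arr.tail else arr.dropLast)) by
        simp [popSim, hc]]
      cases flag with
      | true =>
        simp only [evodC, if_neg hc, rpar, if_true]
        rcases arr with _ | ⟨x, xs⟩
        · simp
        · rw [if_neg (by simp), show (x :: xs).tail = xs from rfl, ih true xs]
          simp only [if_true, List.length_cons]
          by_cases hbig : xs.length < (evodC rest).1 + (evodC rest).2
          · rw [if_pos hbig, if_pos (by omega)]
          · rw [if_neg hbig, if_neg (by omega), List.drop_succ_cons, Nat.add_sub_add_right]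
      | false =>
        simp only [evodC, if_neg hc, rpar, Bool.false_eq_true, if_false]
        by_cases h0 : arr.length = 0
        · rw [if_pos h0, if_pos (by omega)]
        · rw [if_neg h0, ih false arr.dropLast]
          simp only [Bool.false_eq_true, if_false, List.length_dropLast]
          by_cases hbig : arr.length - 1 < (evodC rest).2 + (evodC rest).1
          · rw [if_pos hbig, if_pos (by omega)]
          · rw [if_neg hbig, if_neg (by omega), List.dropLast_eq_take, List.drop_take,
              List.take_take,
              show min (arr.length - 1 - (evodC rest).2 - (evodC rest).1)
                    (arr.length - 1 - (evodC rest).2)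
                  = arr.length - (evodC rest).2 - ((evodC rest).1 + 1) from by omega]

lemma popSim_true (chars : List Char) (arr : List Int) :
    popSim chars true arr =
      if arr.length < (evodC chars).1 + (evodC chars).2 then none
      else some (!rpar chars,
        (arr.drop (evodC chars).1).take (arr.length - (evodC chars).1 - (evodC chars).2)) := by
  rw [popSim_spec chars true arr]
  simp

lemma slice_counters (l : List Int) (a b : Nat) (hb : b ≤ l.length) :
    PySem.List.slice l (some (a : Int)) (some ((l.length : Int) - (b : Int)))
      = (l.drop a).take (l.length - a - b) := by
  have h : ((l.length : Int) - (b : Int)) = ((l.length - b : Nat) : Int) := by omega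
  rw [h, PySem.List.slice_natCast]
  congr 1
  omega

-- the port's segs are splitR of the characters
lemma segs_eq (word : String) :
    ((PySem.Str.split? word "R").getD []).map String.toList = splitR word.toList := by
  have h := PySem.Str.split?_map word "R"
  rw [show ("R" : String).toList = ['R'] from rfl] at h
  rw [show PySem.Chars.split? word.toList ['R'] = some (PySem.Chars.splitOn word.toList ['R']) from rfl] at h
  cases hs : PySem.Str.split? word "R" with
  | none => rw [hs] at h; simp at h
  | some L =>
    rw [hs] at h
    simp only [Option.map_some, Option.some.injEq] at h
    simpa [splitOn_eq_splitR] using h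

-- ===== VERDICT (by name: the statement is the Claim_ definition above) =====
theorem func_spec : Claim_equal_func := by
  intro word n arr _ _
  unfold Spec_func func func_alt
  dsimp only
  rw [show (if n == 0 then ([] : List Int)
      else (((PySem.Str.split? (PySem.Str.slice arr (some 1) (some (-1))) ",").getD []).map
        (fun x => (PySem.Int.ofStr? x).getD 0))) = parseA n arr from rfl]
  generalize parseA n arr = data
  rw [popSim_true word.toList data]
  set segs := (PySem.Str.split? word "R").getD [] with hsegs
  have hmap : segs.map String.toList = splitR word.toList := segs_eq word
  have hseg := segSums_spec segs 0 0 0 (le_refl 0)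
  rw [if_pos (show (0:Int) % 2 = 0 by norm_num)] at hseg
  rw [hmap, evod_splitR] at hseg
  simp only [zero_add] at hseg
  rw [hseg]
  set E := (evodC word.toList).1 with hE
  set O := (evodC word.toList).2 with hO
  by_cases hbig : data.length < E + O
  · rw [if_pos hbig, if_pos (by push_cast; omega)]
  · rw [if_neg hbig, if_neg (by push_cast; omega)]
    have hlen : segs.length = (splitR word.toList).length := by
      rw [← hmap, List.length_map]
    have hrem : PySem.List.slice data (some (E : Int)) (some ((data.length : Int) - (O : Int)))
        = (data.drop E).take (data.length - E - O) := slice_counters data E O (by omega)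
    dsimp only
    rw [hrem]
    have hpar := length_splitR word.toList
    cases hr : rpar word.toList with
    | false =>
      rw [hr] at hpar
      simp only [Bool.false_eq_true, if_false] at hpar
      have hB : ¬ (segs.length % 2 = 0) := by rw [hlen, hpar]; omega
      rw [if_neg hB]
      simp [fmtA]
    | true =>
      rw [hr] at hpar
      simp only [if_true] at hpar
      have hB : segs.length % 2 = 0 := by rw [hlen, hpar]
      rw [if_pos hB]
      simp [fmtA]
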